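-- pv_equiv track=rewrite | github.com/szaboeman/adventOfCode2018Python | day6/day6.py | areaPiece
-- ===== SOURCE A (Python) =====
-- def areaPiece(area,sign):
--     p=0
--     for i,row in enumerate(area):
--         for j,value in enumerate(row):
--             if (value==sign):
--                 if (i==0 or j==0 or i==399 or j==399):
--                     return -1
--                 else:
--                     p+=1
--     return p
-- ===== SOURCE B (Python) =====
-- def areaPiece(area, sign):
--     matches = [(i, j) for i, row in enumerate(area) for j, v in enumerate(row) if v == sign]
--     if any(i in (0, 399) or j in (0, 399) for i, j in matches):
--         return -1
--     return len(matches)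
-- ===== Notes on version B (the rewrite author's own statement) =====
-- stated objective: simpler
-- what changed: Replaces the fused early-exit counting loop with a gather-then-check decomposition: build the list of matching coordinates with one comprehension, then a separate any() pass for the border condition and len() for the count.
import Mathlib
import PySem

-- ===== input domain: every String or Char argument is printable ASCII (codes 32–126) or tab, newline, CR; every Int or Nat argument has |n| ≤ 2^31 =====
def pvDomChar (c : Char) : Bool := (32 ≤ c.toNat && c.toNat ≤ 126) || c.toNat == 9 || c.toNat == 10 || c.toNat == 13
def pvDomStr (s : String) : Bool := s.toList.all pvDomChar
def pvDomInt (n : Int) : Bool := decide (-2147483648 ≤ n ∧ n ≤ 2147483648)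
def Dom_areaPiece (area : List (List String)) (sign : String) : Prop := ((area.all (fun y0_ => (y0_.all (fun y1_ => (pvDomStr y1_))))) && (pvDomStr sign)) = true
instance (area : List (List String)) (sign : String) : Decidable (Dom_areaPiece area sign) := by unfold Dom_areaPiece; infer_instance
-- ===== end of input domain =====

-- B replaces A's fused early-exit counting loop with a gather-then-check decomposition
-- (collect matching coordinates, then one border test and a length); objective: simpler.

-- ===== PORT A =====
-- inner 'for j,value in enumerate(row)' loop; .error = the early 'return -1'
def areaPieceInner (sign : String) (i : Int) (p : Int) : List (Int × String) → Except Int Int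
  | [] => .ok p
  | (j, value) :: rest =>
    if value == sign then
      if i == 0 || j == 0 || i == 399 || j == 399 then .error (-1)
      else areaPieceInner sign i (p + 1) rest
    else areaPieceInner sign i p rest

-- outer 'for i,row in enumerate(area)' loop
def areaPieceOuter (sign : String) : List (Int × List String) → Int → Int
  | [], p => p
  | (i, row) :: rest, p =>
    match areaPieceInner sign i p (PySem.List.enumerate row 0) with
    | .error r => r
    | .ok p' => areaPieceOuter sign rest p'

def areaPiece (area : List (List String)) (sign : String) : Int :=
  areaPieceOuter sign (PySem.List.enumerate area 0) 0

-- ===== PORT B =====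
def areaPiece_alt (area : List (List String)) (sign : String) : Int :=
  let ms := (PySem.List.enumerate area 0).flatMap (fun pr =>
    (PySem.List.enumerate pr.2 0).filterMap (fun q =>
      if q.2 == sign then some (pr.1, q.1) else none))
  if ms.any (fun m => m.1 == 0 || m.1 == 399 || m.2 == 0 || m.2 == 399) then -1
  else (ms.length : Int)

-- ===== PRECONDITION & SPEC =====
def Spec_areaPiece (area : List (List String)) (sign : String) (out : Int) : Prop := out = areaPiece_alt area sign
instance (area : List (List String)) (sign : String) (out : Int) : Decidable (Spec_areaPiece area sign out) := by unfold Spec_areaPiece; infer_instance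

-- ===== CLAIM =====
def Claim_equal_areaPiece : Prop := ∀ (area : List (List String)) (sign : String), Dom_areaPiece area sign → Spec_areaPiece area sign (areaPiece area sign)

-- ===== LEMMAS AND PROOFS =====

def pvBorder (m : Int × Int) : Bool := m.1 == 0 || m.1 == 399 || m.2 == 0 || m.2 == 399

def pvRowMatches (sign : String) (i : Int) (es : List (Int × String)) : List (Int × Int) :=
  es.filterMap (fun q => if q.2 == sign then some (i, q.1) else none)

theorem bord_eq (i j : Int) : (i == 0 || j == 0 || i == 399 || j == 399) = pvBorder (i, j) := by
  simp only [pvBorder]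
  cases h1 : (i == 0) <;> cases h2 : (j == 0) <;> cases h3 : (i == 399) <;> cases h4 : (j == 399) <;> rfl

theorem inner_char (sign : String) (i : Int) (es : List (Int × String)) :
    ∀ p : Int, areaPieceInner sign i p es =
      (if (pvRowMatches sign i es).any pvBorder then Except.error (-1)
       else Except.ok (p + (pvRowMatches sign i es).length)) := by
  induction es with
  | nil =>
    intro p
    show Except.ok p = if (pvRowMatches sign i []).any pvBorder then _ else _
    simp [pvRowMatches]
  | cons hd tl ih =>
    intro p
    obtain ⟨j, value⟩ := hd
    by_cases hv : (value == sign) = true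
    · have hveq : value = sign := by simpa using hv
      rw [show pvRowMatches sign i ((j, value) :: tl) = (i, j) :: pvRowMatches sign i tl by
        simp [pvRowMatches, hveq]]
      rw [List.any_cons]
      by_cases hb : pvBorder (i, j) = true
      · simp only [areaPieceInner, hv, bord_eq, hb, Bool.true_or, if_pos]
      · simp only [Bool.not_eq_true] at hb
        simp only [areaPieceInner, hv, if_true, bord_eq, hb, Bool.false_or, Bool.false_eq_true,
          if_false, ih (p + 1), List.length_cons]
        split
        · rfl
        · congr 1; push_cast; ring
    · simp only [Bool.not_eq_true] at hv
      have hveq : ¬ value = sign := by simpa using hv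
      rw [show pvRowMatches sign i ((j, value) :: tl) = pvRowMatches sign i tl by
        simp [pvRowMatches, hveq]]
      simp only [areaPieceInner, hv, if_false, Bool.false_eq_true]
      exact ih p

def pvAllMatches (sign : String) (es : List (Int × List String)) : List (Int × Int) :=
  es.flatMap (fun pr => pvRowMatches sign pr.1 (PySem.List.enumerate pr.2 0))

theorem outer_char (sign : String) (es : List (Int × List String)) :
    ∀ p : Int, areaPieceOuter sign es p =
      (if (pvAllMatches sign es).any pvBorder then -1
       else p + (pvAllMatches sign es).length) := by
  induction es with
  | nil =>
    intro p
    show p = if (pvAllMatches sign []).any pvBorder then _ else _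
    simp [pvAllMatches]
  | cons hd tl ih =>
    intro p
    obtain ⟨i, row⟩ := hd
    rw [show pvAllMatches sign ((i, row) :: tl)
        = pvRowMatches sign i (PySem.List.enumerate row 0) ++ pvAllMatches sign tl by
      simp [pvAllMatches, List.flatMap_cons]]
    rw [List.any_append, List.length_append]
    have h := inner_char sign i (PySem.List.enumerate row 0) p
    by_cases hb : (pvRowMatches sign i (PySem.List.enumerate row 0)).any pvBorder = true
    · simp only [areaPieceOuter, h, hb, if_pos, Bool.true_or]
    · simp only [Bool.not_eq_true] at hb
      simp only [areaPieceOuter, h, hb, Bool.false_or, Bool.false_eq_true, if_false, ih]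
      split
      · rfl
      · push_cast; ring

theorem areaPiece_eq (area : List (List String)) (sign : String) :
    areaPiece area sign = areaPiece_alt area sign := by
  rw [areaPiece, outer_char sign (PySem.List.enumerate area 0) 0]
  have hB : pvBorder = (fun m : Int × Int => m.1 == 0 || m.1 == 399 || m.2 == 0 || m.2 == 399) := rfl
  rw [show areaPiece_alt area sign =
      (if (pvAllMatches sign (PySem.List.enumerate area 0)).any pvBorder then -1
       else ((pvAllMatches sign (PySem.List.enumerate area 0)).length : Int)) by
    simp only [areaPiece_alt, pvAllMatches, pvRowMatches, hB]]
  split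
  · rfl
  · omega

-- ===== VERDICT =====
theorem areaPiece_spec : Claim_equal_areaPiece := by
  intro area sign _
  exact areaPiece_eq area sign
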